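-- pv_equiv track=rewrite | github.com/raeez/chiral-bar-cobar | compute/lib/virasoro_c13_test.py | ramanujan_tau_table
-- ===== SOURCE A (Python) =====
-- import math
--
-- def ramanujan_tau_table(nmax):
--     """Compute tau(1), ..., tau(nmax) all at once (efficient batch)."""
--     if nmax < 1:
--         return []
--     # Compute coefficients of prod_{j=1}^{nmax} (1-q^j)^{24} up to q^{nmax}
--     N = nmax + 1
--     coeffs = [0] * N
--     coeffs[0] = 1
--
--     for j in range(1, nmax + 1):
--         binom_coeffs = []
--         for k in range(25):
--             binom_coeffs.append(math.comb(24, k) * ((-1) ** k))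
--
--         for m in range(N - 1, -1, -1):
--             if coeffs[m] == 0:
--                 continue
--             for k in range(1, 25):
--                 target = m + k * j
--                 if target >= N:
--                     break
--                 coeffs[target] += coeffs[m] * binom_coeffs[k]
--
--     # tau(n) = coeffs[n-1] in prod, but Delta = q * prod, so tau(n) = coeffs[n-1]
--     # Actually: Delta = q * prod(1-q^n)^{24} = sum tau(n) q^n
--     # So coefficient of q^n in Delta = tau(n) = coefficient of q^{n-1} in prod.
--     # But we computed prod up to q^{nmax}, so tau(n) = coeffs[n-1] for n=1..nmax+1
--     # Wait: we need coeffs[0..nmax-1] for tau(1..nmax).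
--     return [coeffs[n - 1] for n in range(1, nmax + 1)]
-- ===== SOURCE B (Python) =====
-- import math
--
-- def ramanujan_tau_table(nmax):
--     """Compute tau(1), ..., tau(nmax) all at once (efficient batch)."""
--     if nmax < 1:
--         return []
--     N = nmax + 1
--     binom = [math.comb(24, k) * ((-1) ** k) for k in range(25)]
--     coeffs = [1] + [0] * (N - 1)
--     for j in range(nmax, 0, -1):
--         coeffs = [sum(binom[k] * coeffs[t - k * j] for k in range(min(t // j, 24) + 1))
--                   for t in range(N)]
--     return coeffs[:nmax]
-- ===== Notes on version B (the rewrite author's own statement) =====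
-- stated objective: alternative
-- what changed: A multiplies the truncated product by each (1-q^j)^24 via an in-place descending scatter pass with break/continue and rebuilds the binomial row every iteration; B precomputes the row once, processes the factors in the opposite order, and builds each new coefficient array functionally as a per-target gather convolution (a comprehension with an explicit k-bound instead of in-place updates).
import Mathlib
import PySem

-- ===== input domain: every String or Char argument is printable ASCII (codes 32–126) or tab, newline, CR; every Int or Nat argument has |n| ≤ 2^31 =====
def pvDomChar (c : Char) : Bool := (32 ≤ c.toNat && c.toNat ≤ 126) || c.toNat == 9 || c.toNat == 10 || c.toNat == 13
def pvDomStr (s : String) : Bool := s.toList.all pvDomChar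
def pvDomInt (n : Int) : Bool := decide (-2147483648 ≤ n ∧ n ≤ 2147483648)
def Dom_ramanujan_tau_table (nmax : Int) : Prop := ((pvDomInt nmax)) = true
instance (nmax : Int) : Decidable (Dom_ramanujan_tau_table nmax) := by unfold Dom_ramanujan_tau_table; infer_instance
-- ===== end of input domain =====

-- B replaces A's in-place scatter pass (with break/continue) by a per-target gather
-- convolution built as a comprehension, runs the factors in the opposite order, and
-- precomputes the binomial row once; same return value (objective: alternative).

-- ===== PORT A =====
-- inner 'for k in range(1, 25)' loop with its break (target >= N); indices are in range
def pvInnerA (j N m : Int) (b : List Int) (k : Nat) (c : List Int) : List Int :=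
  if k < 25 then
    let target := m + (k : Int) * j
    if target ≥ N then c
    else pvInnerA j N m b (k + 1)
      (PySem.List.pySetD c target
        (PySem.List.pyGetD c target 0 + PySem.List.pyGetD c m 0 * PySem.List.pyGetD b (k : Int) 0))
  else c
termination_by 25 - k

-- body of the 'for m in range(N-1, -1, -1)' loop, with the 'continue' on a zero coefficient
def pvStepA (j N : Int) (b : List Int) (c : List Int) (m : Int) : List Int :=
  if PySem.List.pyGetD c m 0 = 0 then c
  else pvInnerA j N m b 1 c

def ramanujan_tau_table (nmax : Int) : List Int :=
  if nmax < 1 then []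
  else
    let N := nmax + 1
    -- coeffs = [0]*N ; coeffs[0] = 1
    let coeffs0 := PySem.List.pySetD (List.replicate N.toNat (0 : Int)) 0 1
    let coeffs := (PySem.List.pyRange 1 (nmax + 1)).foldl (fun c j =>
      -- binom_coeffs rebuilt by append inside the j-loop, as in the Python
      let binom := (PySem.List.pyRange 0 25).foldl
        (fun acc k => acc ++ [((Nat.choose 24 k.toNat : Int)) * (-1) ^ k.toNat]) ([] : List Int)
      (PySem.List.pyRange (N - 1) (-1) (-1)).foldl (pvStepA j N binom) c) coeffs0
    (PySem.List.pyRange 1 (nmax + 1)).map (fun n => PySem.List.pyGetD coeffs (n - 1) 0)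

-- ===== PORT B =====
def ramanujan_tau_table_alt (nmax : Int) : List Int :=
  if nmax < 1 then []
  else
    let N := nmax + 1
    let binom := (PySem.List.pyRange 0 25).map
      (fun k => ((Nat.choose 24 k.toNat : Int)) * (-1) ^ k.toNat)
    let coeffs := (PySem.List.pyRange nmax 0 (-1)).foldl (fun c j =>
      (PySem.List.pyRange 0 N).map (fun t =>
        ((PySem.List.pyRange 0 (min (PySem.Int.floordiv t j) 24 + 1)).map
          (fun k => PySem.List.pyGetD binom k 0 * PySem.List.pyGetD c (t - k * j) 0)).sum))
      ((1 : Int) :: List.replicate (N - 1).toNat 0)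
    PySem.List.slice coeffs none (some nmax)

-- ===== PRECONDITION & SPEC =====
def Spec_ramanujan_tau_table (nmax : Int) (out : List Int) : Prop := out = ramanujan_tau_table_alt nmax
instance (nmax : Int) (out : List Int) : Decidable (Spec_ramanujan_tau_table nmax out) := by unfold Spec_ramanujan_tau_table; infer_instance

-- ===== CLAIM (what is proved, stated in full; the proofs are below) =====
def Claim_equal_ramanujan_tau_table : Prop := ∀ (nmax : Int), Dom_ramanujan_tau_table nmax → Spec_ramanujan_tau_table nmax (ramanujan_tau_table nmax)

-- ===== LEMMAS AND PROOFS =====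

-- signed binomial coefficient: k-th coefficient of (1 - x)^24
def pvBk (k : Nat) : Int := (Nat.choose 24 k : Int) * (-1) ^ k

-- the binomial row both Pythons tabulate
def pvBinomL : List Int :=
  (PySem.List.pyRange 0 25).map (fun k => ((Nat.choose 24 k.toNat : Int)) * (-1) ^ k.toNat)

-- coefficient view of a list: entry at i, 0 off either end
def pvVal (c : List Int) (i : Int) : Int := if 0 ≤ i then c.getD i.toNat 0 else 0

-- A's whole pass for one factor j (the m-loop down from N-1 to M)
def pvPassA (j N M : Int) (b : List Int) (c : List Int) : List Int :=
  (PySem.List.pyRange (N - 1) (M - 1) (-1)).foldl (pvStepA j N b) c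

-- B's gather pass for one factor j
def pvGatherB (b : List Int) (N j : Int) (c : List Int) : List Int :=
  (PySem.List.pyRange 0 N).map (fun t =>
    ((PySem.List.pyRange 0 (min (PySem.Int.floordiv t j) 24 + 1)).map
      (fun k => PySem.List.pyGetD b k 0 * PySem.List.pyGetD c (t - k * j) 0)).sum)

-- closed gather formula
def pvGSum (j : Int) (c : List Int) (t : Int) : Int :=
  ∑ k ∈ Finset.range 25, (if 0 ≤ t - (k : Int) * j then pvBk k * pvVal c (t - (k : Int) * j) else 0)

lemma pvVal_neg (c : List Int) (i : Int) (h : i < 0) : pvVal c i = 0 := by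
  have : ¬ (0 ≤ i) := by omega
  simp [pvVal, this]

lemma pvVal_eq_getElem (c : List Int) (n : Nat) (_h : n < c.length) : pvVal c (n : Int) = c.getD n 0 := by
  simp [pvVal]

lemma pvGetD_eq_pvVal (c : List Int) (i : Int) (h0 : 0 ≤ i) (h1 : i < (c.length : Int)) :
    PySem.List.pyGetD c i 0 = pvVal c i := by
  rw [PySem.List.pyGetD_eq_getElem c 0 h0 h1]
  simp only [pvVal, if_pos h0]
  rw [List.getD_eq_getElem]

lemma pvVal_ext (c d : List Int) (hl : c.length = d.length)
    (h : ∀ n : Nat, n < c.length → pvVal c n = pvVal d n) : c = d := by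
  apply List.ext_getElem hl
  intro n h1 h2
  have := h n h1
  rw [pvVal_eq_getElem c n h1, pvVal_eq_getElem d n h2] at this
  rwa [List.getD_eq_getElem c 0 h1, List.getD_eq_getElem d 0 h2] at this

lemma pvVal_pySetD (c : List Int) (p : Int) (v : Int) (hp : 0 ≤ p) (hlt : p < (c.length : Int))
    (i : Int) : pvVal (PySem.List.pySetD c p v) i = if i = p then v else pvVal c i := by
  rw [PySem.List.pySetD_of_nonneg c v hp]
  by_cases h0 : 0 ≤ i
  · simp only [pvVal, if_pos h0]
    rw [List.getD_eq_getElem?_getD, List.getD_eq_getElem?_getD, List.getElem?_set]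
    split_ifs with h1 h2 h3 <;> simp_all <;> omega
  · rw [pvVal_neg _ _ (by omega), pvVal_neg _ _ (by omega), if_neg (by omega)]

lemma pvBinomL_get (k : Nat) (hk : k < 25) :
    PySem.List.pyGetD pvBinomL (k : Int) 0 = pvBk k := by
  have h := PySem.List.pyGetD_map_pyRange
    (fun k : Int => ((Nat.choose 24 k.toNat : Int)) * (-1) ^ k.toNat) 25 k 0 hk
  simpa [pvBinomL, pvBk] using h

lemma pvBinomL_foldl :
    (PySem.List.pyRange 0 25).foldl
      (fun acc k => acc ++ [((Nat.choose 24 k.toNat : Int)) * (-1) ^ k.toNat]) ([] : List Int)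
      = pvBinomL := by
  rw [PySem.List.foldl_append_singleton_eq_map, List.nil_append, pvBinomL]

lemma pvSum_map_pyRange (f : Int → Int) (n : Nat) :
    ((PySem.List.pyRange 0 (n : Int)).map f).sum = ∑ k ∈ Finset.range n, f (k : Int) := by
  rw [PySem.List.pyRange_zero_nat, List.map_map]
  rfl

-- characterization of A's inner k-loop
lemma pvInnerA_char (j N m : Int) (b c : List Int) (k0 : Nat)
    (hj : 1 ≤ j) (hb : ∀ k : Nat, k < 25 → PySem.List.pyGetD b (k : Int) 0 = pvBk k)
    (hlen : (c.length : Int) = N) (hm0 : 0 ≤ m) (hmN : m < N) (hk0 : 1 ≤ k0) :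
    (pvInnerA j N m b k0 c).length = c.length ∧
    ∀ i : Int, pvVal (pvInnerA j N m b k0 c) i =
      pvVal c i + ∑ k ∈ Finset.Ico k0 25,
        (if i = m + (k : Int) * j ∧ i < N then pvVal c m * pvBk k else 0) := by
  induction h25 : 25 - k0 generalizing k0 c with
  | zero =>
    have hk : ¬ (k0 < 25) := by omega
    rw [pvInnerA.eq_def]
    simp only [if_neg hk]
    refine ⟨by trivial, fun i => ?_⟩
    rw [Finset.Ico_eq_empty (by omega), Finset.sum_empty]
    ring
  | succ n ih =>
    have hk : k0 < 25 := by omega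
    rw [pvInnerA.eq_def]
    simp only [if_pos hk]
    by_cases htg : m + (k0 : Int) * j ≥ N
    · simp only [if_pos htg]
      refine ⟨by trivial, fun i => ?_⟩
      have hz : ∀ k ∈ Finset.Ico k0 25,
          (if i = m + (k : Int) * j ∧ i < N then pvVal c m * pvBk k else 0) = 0 := by
        intro k hkm
        rw [Finset.mem_Ico] at hkm
        rw [if_neg]
        rintro ⟨rfl, hiN⟩
        have hkk : (k0 : Int) ≤ (k : Int) := by exact_mod_cast hkm.1
        have hjj : (k0 : Int) * j ≤ (k : Int) * j := by nlinarith
        omega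
      rw [Finset.sum_congr rfl hz, Finset.sum_const_zero]
      ring
    · simp only [if_neg htg]
      have ht0 : 0 ≤ m + (k0 : Int) * j := by
        have : (0 : Int) ≤ (k0 : Int) * j := mul_nonneg (by positivity) (by omega)
        omega
      have htN : m + (k0 : Int) * j < N := by omega
      have hk0j : (1 : Int) ≤ (k0 : Int) * j := by
        have h1 : (1 : Int) ≤ (k0 : Int) := by exact_mod_cast hk0
        nlinarith
      set w := PySem.List.pyGetD c (m + (k0 : Int) * j) 0
        + PySem.List.pyGetD c m 0 * PySem.List.pyGetD b ((k0 : Nat) : Int) 0 with hw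
      set c' := PySem.List.pySetD c (m + (k0 : Int) * j) w with hc'
      have hlen' : (c'.length : Int) = N := by
        rw [hc', PySem.List.pySetD_of_nonneg c w ht0, List.length_set, hlen]
      obtain ⟨hL, hV⟩ := ih c' (k0 + 1) hlen' (by omega) (by omega)
      constructor
      · rw [hL, hc', PySem.List.pySetD_of_nonneg c w ht0, List.length_set]
      · intro i
        rw [hV i]
        have hc'm : pvVal c' m = pvVal c m := by
          rw [hc', pvVal_pySetD c _ w ht0 (by omega) m, if_neg (by omega)]
        have hc'i : pvVal c' i
            = pvVal c i + (if i = m + (k0 : Int) * j ∧ i < N then pvVal c m * pvBk k0 else 0) := by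
          rw [hc', pvVal_pySetD c _ w ht0 (by omega) i]
          split_ifs with h1 h2 h2
          · rw [hw, pvGetD_eq_pvVal c _ ht0 (by omega), pvGetD_eq_pvVal c m hm0 (by omega),
              hb k0 hk, h1]
          · exact absurd ⟨h1, by omega⟩ h2
          · exact absurd h2.1 h1
          · ring
        rw [hc'i, Finset.sum_congr rfl
          (fun k _ => by rw [hc'm] :
            ∀ k ∈ Finset.Ico (k0 + 1) 25,
              (if i = m + (k : Int) * j ∧ i < N then pvVal c' m * pvBk k else 0)
              = (if i = m + (k : Int) * j ∧ i < N then pvVal c m * pvBk k else 0)),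
          Finset.sum_eq_sum_Ico_succ_bot (by omega : k0 < 25)]
        ring

-- characterization of one m-step (including the 'continue')
lemma pvStepA_char (j N m : Int) (b c : List Int)
    (hj : 1 ≤ j) (hb : ∀ k : Nat, k < 25 → PySem.List.pyGetD b (k : Int) 0 = pvBk k)
    (hlen : (c.length : Int) = N) (hm0 : 0 ≤ m) (hmN : m < N) :
    (pvStepA j N b c m).length = c.length ∧
    ∀ i : Int, pvVal (pvStepA j N b c m) i =
      pvVal c i + ∑ k ∈ Finset.Ico (1:ℕ) 25,
        (if i = m + (k : Int) * j ∧ i < N then pvVal c m * pvBk k else 0) := by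
  rw [pvStepA]
  split_ifs with h0
  · refine ⟨rfl, fun i => ?_⟩
    have hm : pvVal c m = 0 := by rw [← pvGetD_eq_pvVal c m hm0 (by omega), h0]
    have hz : ∀ k ∈ Finset.Ico (1:ℕ) 25,
        (if i = m + (k : Int) * j ∧ i < N then pvVal c m * pvBk k else 0) = 0 := by
      intro k _
      rw [hm]
      split_ifs <;> ring
    rw [Finset.sum_congr rfl hz, Finset.sum_const_zero]
    ring
  · exact pvInnerA_char j N m b c 1 hj hb hlen hm0 hmN le_rfl

-- characterization of A's whole descending pass
lemma pvPassA_char (j N : Int) (b c : List Int) (M : Int)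
    (hj : 1 ≤ j) (hb : ∀ k : Nat, k < 25 → PySem.List.pyGetD b (k : Int) 0 = pvBk k)
    (hlen : (c.length : Int) = N) (hM0 : 0 ≤ M) (hMN : M ≤ N) :
    (pvPassA j N M b c).length = c.length ∧
    ∀ i : Int, pvVal (pvPassA j N M b c) i =
      pvVal c i + ∑ k ∈ Finset.Ico (1:ℕ) 25,
        (if M ≤ i - (k : Int) * j ∧ i < N then pvVal c (i - (k : Int) * j) * pvBk k else 0) := by
  have hkj : ∀ k : Nat, k ∈ Finset.Ico (1:ℕ) 25 → (1 : Int) ≤ (k : Int) * j := by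
    intro k hkm
    rw [Finset.mem_Ico] at hkm
    have h1 : (1 : Int) ≤ (k : Int) := by exact_mod_cast hkm.1
    nlinarith
  induction hfuel : (N - M).toNat generalizing M c with
  | zero =>
    have hMN' : M = N := by omega
    rw [pvPassA, PySem.List.pyRange_neg_one_eq_nil (by omega)]
    refine ⟨rfl, fun i => ?_⟩
    have hz : ∀ k ∈ Finset.Ico (1:ℕ) 25,
        (if M ≤ i - (k : Int) * j ∧ i < N then pvVal c (i - (k : Int) * j) * pvBk k else 0) = 0 := by
      intro k hkm
      rw [if_neg]
      rintro ⟨ha, hbn⟩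
      have := hkj k hkm
      omega
    rw [List.foldl_nil, Finset.sum_congr rfl hz, Finset.sum_const_zero]
    ring
  | succ n ihn =>
    have hMN' : M < N := by omega
    have hsplit : PySem.List.pyRange (N - 1) (M - 1) (-1)
        = PySem.List.pyRange (N - 1) M (-1) ++ [M] := by
      rw [PySem.List.pyRange_neg_one_eq_reverse, PySem.List.pyRange_neg_one_eq_reverse]
      rw [show M - 1 + 1 = M by ring, show M + 1 = M + 1 by ring]
      rw [PySem.List.pyRange_one_cons (by omega : M < N - 1 + 1)]
      rw [List.reverse_cons]
    rw [pvPassA, hsplit, List.foldl_append, List.foldl_cons, List.foldl_nil]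
    obtain ⟨hL1, hV1⟩ := ihn c (M + 1) hlen (by omega) (by omega) (by omega)
    rw [pvPassA] at hL1 hV1
    have hlen1 : ((((PySem.List.pyRange (N - 1) (M + 1 - 1) (-1)).foldl (pvStepA j N b) c)).length : Int) = N := by
      rw [hL1, hlen]
    rw [show M + 1 - 1 = M by ring] at hL1 hV1 hlen1
    obtain ⟨hL2, hV2⟩ := pvStepA_char j N M b _ hj hb hlen1 hM0 (by omega)
    constructor
    · rw [hL2, hL1]
    · intro i
      rw [hV2 i]
      have hcM : pvVal ((PySem.List.pyRange (N - 1) M (-1)).foldl (pvStepA j N b) c) M = pvVal c M := by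
        rw [hV1 M]
        have hz : ∀ k ∈ Finset.Ico (1:ℕ) 25,
            (if M + 1 ≤ M - (k : Int) * j ∧ M < N then pvVal c (M - (k : Int) * j) * pvBk k else 0) = 0 := by
          intro k hkm
          rw [if_neg]
          rintro ⟨ha, _⟩
          have := hkj k hkm
          omega
        rw [Finset.sum_congr rfl hz, Finset.sum_const_zero]
        ring
      rw [hV1 i, hcM]
      have hmerge : ∀ k ∈ Finset.Ico (1:ℕ) 25,
          (if M + 1 ≤ i - (k : Int) * j ∧ i < N then pvVal c (i - (k : Int) * j) * pvBk k else 0)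
          + (if i = M + (k : Int) * j ∧ i < N then pvVal c M * pvBk k else 0)
          = (if M ≤ i - (k : Int) * j ∧ i < N then pvVal c (i - (k : Int) * j) * pvBk k else 0) := by
        intro k hkm
        by_cases hiN : i < N
        · by_cases heq : i = M + (k : Int) * j
          · rw [if_neg (by omega), if_pos ⟨heq, hiN⟩, if_pos ⟨show M ≤ i - (k : Int) * j by omega, hiN⟩,
              show i - (k : Int) * j = M by omega]
            ring
          · by_cases hge : M + 1 ≤ i - (k : Int) * j
            · rw [if_pos ⟨hge, hiN⟩, if_neg (by tauto), if_pos ⟨by omega, hiN⟩]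
              ring
            · rw [if_neg (by tauto), if_neg (by tauto), if_neg (by omega)]
              ring
        · rw [if_neg (by tauto), if_neg (by tauto), if_neg (by tauto)]
          ring
      rw [← Finset.sum_congr rfl hmerge, Finset.sum_add_distrib]
      ring

lemma pvGatherB_length (b : List Int) (N j : Int) (c : List Int) :
    (pvGatherB b N j c).length = N.toNat := by
  simp [pvGatherB, PySem.List.length_pyRange_one]

-- closed formula for B's gather pass (any i < N, including negative i)
lemma pvGatherB_char (N j : Int) (c : List Int)
    (hj : 1 ≤ j) (hlen : (c.length : Int) = N) (i : Int) (hi : i < N) :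
    pvVal (pvGatherB pvBinomL N j c) i = pvGSum j c i := by
  by_cases h0 : 0 ≤ i
  case neg =>
    rw [pvVal_neg _ _ (by omega), pvGSum]
    symm
    apply Finset.sum_eq_zero
    intro k _
    rw [if_neg]
    intro hcon
    have : (0 : Int) ≤ (k : Int) * j := mul_nonneg (by positivity) (by omega)
    omega
  case pos =>
    have hin : i = (i.toNat : Int) := by omega
    have hlen2 : i.toNat < (pvGatherB pvBinomL N j c).length := by
      rw [pvGatherB_length]; omega
    rw [hin, pvVal_eq_getElem _ i.toNat hlen2, List.getD_eq_getElem _ _ hlen2]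
    unfold pvGatherB
    rw [List.getElem_map, PySem.List.getElem_pyRange_one 0 N i.toNat
      (by rw [PySem.List.length_pyRange_one]; omega), zero_add, ← hin]
    -- the inner python sum, as a Finset sum over range L
    have hq0 : 0 ≤ PySem.Int.floordiv i j := by
      rw [PySem.Int.le_floordiv_iff_mul_le (show (0:Int) < j by omega), zero_mul]
      exact h0
    set L : Int := min (PySem.Int.floordiv i j) 24 + 1 with hL
    have hL0 : 0 ≤ L := by omega
    have hLle : L.toNat ≤ 25 := by omega
    have hLcast : ((L.toNat : Nat) : Int) = L := by omega
    rw [show PySem.List.pyRange 0 L = PySem.List.pyRange 0 ((L.toNat : Nat) : Int) by rw [hLcast]]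
    rw [pvSum_map_pyRange]
    rw [pvGSum]
    have hstep1 : ∀ k ∈ Finset.range L.toNat,
        PySem.List.pyGetD pvBinomL (k : Int) 0 * PySem.List.pyGetD c (i - (k : Int) * j) 0
        = (if 0 ≤ i - (k : Int) * j then pvBk k * pvVal c (i - (k : Int) * j) else 0) := by
      intro k hk
      rw [Finset.mem_range] at hk
      have hkq : (k : Int) ≤ PySem.Int.floordiv i j := by omega
      have hkj : (k : Int) * j ≤ i := by
        rw [← PySem.Int.le_floordiv_iff_mul_le (show (0:Int) < j by omega)]
        exact hkq
      have hkj0 : 0 ≤ (k : Int) * j := mul_nonneg (by positivity) (by omega)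
      rw [if_pos (by omega), pvBinomL_get k (by omega),
        pvGetD_eq_pvVal c _ (by omega) (by omega)]
    rw [Finset.sum_congr rfl hstep1]
    apply Finset.sum_subset (by intro x hx; rw [Finset.mem_range] at *; omega)
    intro k hk25 hkL
    rw [Finset.mem_range] at hk25
    rw [Finset.mem_range, not_lt] at hkL
    rw [if_neg]
    intro hcon
    have hkq : (PySem.Int.floordiv i j) < (k : Int) := by omega
    rw [PySem.Int.floordiv_lt_iff_lt_mul (by omega)] at hkq
    omega

-- the two passes agree
lemma pvPass_eq (j N : Int) (c : List Int)
    (hj : 1 ≤ j) (hlen : (c.length : Int) = N) (hN : 1 ≤ N) :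
    pvPassA j N 0 pvBinomL c = pvGatherB pvBinomL N j c := by
  obtain ⟨hL, hV⟩ := pvPassA_char j N pvBinomL c 0 hj (fun k hk => pvBinomL_get k hk)
    hlen (le_refl 0) (by omega)
  apply pvVal_ext
  · rw [hL, pvGatherB_length]; omega
  · intro n hn
    rw [hL] at hn
    have hnN : ((n : Nat) : Int) < N := by omega
    rw [hV n, pvGatherB_char N j c hj hlen n hnN, pvGSum]
    rw [Finset.range_eq_Ico]
    conv_rhs => rw [Finset.sum_eq_sum_Ico_succ_bot (by omega)]
    have h00 : (if 0 ≤ (n : Int) - ((0 : Nat) : Int) * j then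
        pvBk 0 * pvVal c ((n : Int) - ((0 : Nat) : Int) * j) else 0) = pvVal c n := by
      simp [pvBk]
    rw [h00]
    have hcg : ∀ k ∈ Finset.Ico (1:ℕ) 25,
        (if 0 ≤ (n : Int) - (k : Int) * j ∧ (n : Int) < N then
          pvVal c ((n : Int) - (k : Int) * j) * pvBk k else 0)
        = (if 0 ≤ (n : Int) - (k : Int) * j then
          pvBk k * pvVal c ((n : Int) - (k : Int) * j) else 0) := by
      intro k _
      split_ifs with h1 h2 h2
      · ring
      · exact absurd h1.1 h2
      · exact absurd ⟨h2, hnN⟩ h1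
      · rfl
    rw [Finset.sum_congr rfl hcg]

-- gather passes commute
lemma pvGatherB_comm (N j j' : Int) (c : List Int)
    (hj : 1 ≤ j) (hj' : 1 ≤ j') (hlen : (c.length : Int) = N) :
    pvGatherB pvBinomL N j (pvGatherB pvBinomL N j' c)
      = pvGatherB pvBinomL N j' (pvGatherB pvBinomL N j c) := by
  have hN0 : 0 ≤ N := by omega
  -- canonical double-sum form of a composed gather, at any n < N
  have hdouble : ∀ (a a' : Int), 1 ≤ a → 1 ≤ a' → ∀ n : Int, n < N →
      pvVal (pvGatherB pvBinomL N a (pvGatherB pvBinomL N a' c)) n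
      = ∑ k ∈ Finset.range 25, ∑ k' ∈ Finset.range 25,
          (if 0 ≤ n - (k : Int) * a - (k' : Int) * a' then
            pvBk k * pvBk k' * pvVal c (n - (k : Int) * a - (k' : Int) * a') else 0) := by
    intro a a' ha ha' n hn
    have hlen' : ((pvGatherB pvBinomL N a' c).length : Int) = N := by
      rw [pvGatherB_length]; omega
    rw [pvGatherB_char N a _ ha hlen' n hn, pvGSum]
    apply Finset.sum_congr rfl
    intro k _
    have hka0 : 0 ≤ (k : Int) * a := mul_nonneg (by positivity) (by omega)
    by_cases hg : 0 ≤ n - (k : Int) * a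
    · rw [if_pos hg, pvGatherB_char N a' c ha' hlen (n - (k : Int) * a) (by omega), pvGSum,
        Finset.mul_sum]
      apply Finset.sum_congr rfl
      intro k' _
      rw [mul_ite, mul_zero, ← mul_assoc]
    · rw [if_neg hg]
      symm
      apply Finset.sum_eq_zero
      intro k' _
      rw [if_neg]
      intro hcon
      have : 0 ≤ (k' : Int) * a' := mul_nonneg (by positivity) (by omega)
      omega
  apply pvVal_ext
  · rw [pvGatherB_length, pvGatherB_length]
  · intro n hn
    rw [pvGatherB_length] at hn
    have hnN : ((n : Nat) : Int) < N := by omega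
    rw [hdouble j j' hj hj' n hnN, hdouble j' j hj' hj n hnN, Finset.sum_comm]
    apply Finset.sum_congr rfl
    intro k _
    apply Finset.sum_congr rfl
    intro k' _
    rw [show (n : Int) - (k' : Int) * j - (k : Int) * j'
        = (n : Int) - (k : Int) * j' - (k' : Int) * j by ring]
    split_ifs with h1
    · ring
    · rfl

-- a gather step moves through a gather fold
lemma pvGatherB_foldl_move (N a : Int) (js : List Int) (c : List Int)
    (ha : 1 ≤ a) (hjs : ∀ j ∈ js, 1 ≤ j) (hlen : (c.length : Int) = N) (hN : 1 ≤ N) :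
    js.foldl (fun c j => pvGatherB pvBinomL N j c) (pvGatherB pvBinomL N a c)
      = pvGatherB pvBinomL N a (js.foldl (fun c j => pvGatherB pvBinomL N j c) c) := by
  induction js generalizing c with
  | nil => rfl
  | cons j js ih =>
    rw [List.foldl_cons, List.foldl_cons,
      pvGatherB_comm N j a c (hjs j (by simp)) ha hlen,
      ih (pvGatherB pvBinomL N j c) (fun x hx => hjs x (by simp [hx]))
        (by rw [pvGatherB_length]; omega)]

-- folding the gather pass over the reversed factor list gives the same result
lemma pvGatherB_foldl_reverse (N : Int) (js : List Int) (c : List Int)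
    (hjs : ∀ j ∈ js, 1 ≤ j) (hlen : (c.length : Int) = N) (hN : 1 ≤ N) :
    js.reverse.foldl (fun c j => pvGatherB pvBinomL N j c) c
      = js.foldl (fun c j => pvGatherB pvBinomL N j c) c := by
  induction js generalizing c with
  | nil => rfl
  | cons j js ih =>
    rw [List.reverse_cons, List.foldl_append, List.foldl_cons, List.foldl_nil,
      ih c (fun x hx => hjs x (by simp [hx])) hlen, List.foldl_cons,
      pvGatherB_foldl_move N j js c (hjs j (by simp))
        (fun x hx => hjs x (by simp [hx])) hlen hN]

-- A's fold = B's fold (same factor order)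
lemma pvFold_eq (N : Int) (js : List Int) (c : List Int)
    (hjs : ∀ j ∈ js, 1 ≤ j) (hlen : (c.length : Int) = N) (hN : 1 ≤ N) :
    js.foldl (fun c j => pvPassA j N 0 pvBinomL c) c
      = js.foldl (fun c j => pvGatherB pvBinomL N j c) c := by
  induction js generalizing c with
  | nil => rfl
  | cons j js ih =>
    rw [List.foldl_cons, List.foldl_cons,
      pvPass_eq j N c (hjs j (by simp)) hlen hN,
      ih (pvGatherB pvBinomL N j c) (fun x hx => hjs x (by simp [hx]))
        (by rw [pvGatherB_length]; omega)]

lemma pvInit_eq (N : Int) (hN : 1 ≤ N) :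
    PySem.List.pySetD (List.replicate N.toNat (0 : Int)) 0 1
      = (1 : Int) :: List.replicate (N - 1).toNat 0 := by
  rw [PySem.List.pySetD_of_nonneg _ 1 (le_refl 0)]
  obtain ⟨n, hn⟩ : ∃ n, N.toNat = n + 1 := ⟨N.toNat - 1, by omega⟩
  rw [hn, List.replicate_succ, Int.toNat_zero, List.set_cons_zero,
    show (N - 1).toNat = n by omega]

lemma pvFoldG_length (N : Int) (js : List Int) (c : List Int) (hlen : (c.length : Int) = N) :
    (((js.foldl (fun c j => pvGatherB pvBinomL N j c) c)).length : Int) = N := by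
  induction js generalizing c with
  | nil => exact hlen
  | cons j js ih =>
    rw [List.foldl_cons]
    exact ih _ (by rw [pvGatherB_length]; omega)

lemma pvTail (C : List Int) (nmax : Int) (h1 : 1 ≤ nmax) (hC : (C.length : Int) = nmax + 1) :
    (PySem.List.pyRange 1 (nmax + 1)).map (fun n => PySem.List.pyGetD C (n - 1) 0)
      = PySem.List.slice C none (some nmax) := by
  rw [PySem.List.slice_to C (by omega)]
  apply List.ext_getElem
  · rw [List.length_map, PySem.List.length_pyRange_one, List.length_take]
    omega
  · intro p hp1 hp2
    rw [List.length_map, PySem.List.length_pyRange_one] at hp1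
    rw [List.getElem_map, PySem.List.getElem_pyRange_one 1 (nmax + 1) p
      (by rw [PySem.List.length_pyRange_one]; omega), List.getElem_take]
    rw [show (1 : Int) + (p : Int) - 1 = ((p : Nat) : Int) by ring]
    rw [PySem.List.pyGetD_eq_getElem C 0 (by positivity) (by omega)]
    simp

-- ===== VERDICT (by name: the statement is the Claim_ definition above) =====
theorem ramanujan_tau_table_spec : Claim_equal_ramanujan_tau_table := by
  intro nmax _
  unfold Spec_ramanujan_tau_table ramanujan_tau_table ramanujan_tau_table_alt
  by_cases h : nmax < 1
  · rw [if_pos h, if_pos h]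
  · rw [if_neg h, if_neg h]
    have h1 : 1 ≤ nmax := by omega
    dsimp only
    simp only [pvBinomL_foldl]
    have hBL : (PySem.List.pyRange 0 25).map
        (fun k => ((Nat.choose 24 k.toNat : Int)) * (-1) ^ k.toNat) = pvBinomL := rfl
    simp only [hBL]
    have hstepB : (fun (c : List Int) (j : Int) =>
        (PySem.List.pyRange 0 (nmax + 1)).map (fun t =>
          ((PySem.List.pyRange 0 (min (PySem.Int.floordiv t j) 24 + 1)).map
            (fun k => PySem.List.pyGetD pvBinomL k 0 * PySem.List.pyGetD c (t - k * j) 0)).sum))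
        = fun (c : List Int) (j : Int) => pvGatherB pvBinomL (nmax + 1) j c := rfl
    rw [hstepB]
    have hstepA : (fun (c : List Int) (j : Int) =>
        (PySem.List.pyRange (nmax + 1 - 1) (-1) (-1)).foldl (pvStepA j (nmax + 1) pvBinomL) c)
        = fun (c : List Int) (j : Int) => pvPassA j (nmax + 1) 0 pvBinomL c := rfl
    rw [hstepA]
    rw [pvInit_eq (nmax + 1) (by omega)]
    have hrev : PySem.List.pyRange nmax 0 (-1) = (PySem.List.pyRange 1 (nmax + 1)).reverse := by
      rw [PySem.List.pyRange_neg_one_eq_reverse]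
      norm_num
    rw [hrev]
    have hlen0 : ((((1 : Int) :: List.replicate (nmax + 1 - 1).toNat 0)).length : Int)
        = nmax + 1 := by
      rw [List.length_cons, List.length_replicate]
      omega
    have hjs : ∀ j ∈ PySem.List.pyRange 1 (nmax + 1), 1 ≤ j := by
      intro j hj
      rw [PySem.List.mem_pyRange_one] at hj
      omega
    rw [pvGatherB_foldl_reverse (nmax + 1) _ _ hjs hlen0 (by omega)]
    rw [pvFold_eq (nmax + 1) _ _ hjs hlen0 (by omega)]
    exact pvTail _ nmax h1 (pvFoldG_length (nmax + 1) _ _ hlen0)
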